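-- pv_equiv track=rewrite | github.com/Seniorious123/CellPainting-Claw | src/cellpaint_pipeline/adapters/deepprofiler_project.py | _infer_control_value
-- ===== SOURCE A (Python) =====
-- DEFAULT_CONTROL_CANDIDATES = ['dmso', 'negcon', 'negative_control', 'mock', 'control']
--
-- def _infer_control_value(rows: list[dict[str, str]], label_field: str) -> str:
--     values = [str(row.get(label_field, '')).strip() for row in rows if str(row.get(label_field, '')).strip()]
--     if not values:
--         return 'unknown_control'
--     lowercase_map = {value.lower(): value for value in values}
--     for candidate in DEFAULT_CONTROL_CANDIDATES:
--         if candidate in lowercase_map: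
--             return lowercase_map[candidate]
--     return sorted(set(values))[0]
-- ===== SOURCE B (Python) =====
-- DEFAULT_CONTROL_CANDIDATES = ['dmso', 'negcon', 'negative_control', 'mock', 'control']
--
-- def _infer_control_value(rows: list[dict[str, str]], label_field: str) -> str:
--     rank = {c: i for i, c in enumerate(DEFAULT_CONTROL_CANDIDATES)}
--     best = None
--     best_rank = len(DEFAULT_CONTROL_CANDIDATES)
--     smallest = None
--     for row in rows:
--         v = str(row.get(label_field, '')).strip()
--         if not v:
--             continue
--         if smallest is None or v < smallest:
--             smallest = v
--         r = rank.get(v.lower())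
--         if r is not None and r < best_rank:
--             best_rank = r
--             best = v
--     if best is not None:
--         return best
--     if smallest is None:
--         return 'unknown_control'
--     return smallest
-- ===== Notes on version B (the rewrite author's own statement) =====
-- stated objective: alternative
-- what changed: B makes one pass over the rows keeping a running best-priority candidate (via a rank index over the candidate list) and a running lexicographic minimum, instead of A's staged build-lowercase-map, loop-over-candidates, then sorted(set(...))[0]; Pre_ excludes inputs where two differently-cased spellings of the same control candidate occur, on which A's dict-overwrite (last spelling wins) is accidental and B keeps the first spelling.
-- outside the precondition, e.g. on _infer_control_value([{'l': 'DMSO'}, {'l': 'dmso'}], 'l'): A returns 'dmso', B returns 'DMSO'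
import Mathlib
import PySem

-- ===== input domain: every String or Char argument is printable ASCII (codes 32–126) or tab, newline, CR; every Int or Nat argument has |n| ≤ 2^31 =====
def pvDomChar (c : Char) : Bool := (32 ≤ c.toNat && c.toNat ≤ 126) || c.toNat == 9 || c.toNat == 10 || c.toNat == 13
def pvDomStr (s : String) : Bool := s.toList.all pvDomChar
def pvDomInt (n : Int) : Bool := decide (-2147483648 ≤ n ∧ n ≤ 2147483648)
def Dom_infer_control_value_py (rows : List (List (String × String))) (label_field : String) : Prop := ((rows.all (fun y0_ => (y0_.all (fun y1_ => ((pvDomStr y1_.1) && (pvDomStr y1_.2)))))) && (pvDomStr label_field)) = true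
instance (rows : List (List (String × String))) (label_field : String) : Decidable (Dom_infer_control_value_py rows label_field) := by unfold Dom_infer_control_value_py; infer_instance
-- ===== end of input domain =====

-- B replaces A's build-lowercase-map / loop-over-candidates / sorted(set)[0] staging by ONE pass over the rows
-- keeping a running best-priority candidate (rank index over the candidate list) and a running lexicographic minimum.

-- DEFAULT_CONTROL_CANDIDATES (module constant shared by both programs)
def pyControlCandidates : List String := ["dmso", "negcon", "negative_control", "mock", "control"]

-- ===== PORT A =====
def infer_control_value_py (rows : List (List (String × String))) (label_field : String) : String :=
  let values := (rows.filter (fun row =>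
      PySem.Str.strip ((PySem.Dict.ofList row).getD label_field "") ≠ "")).map
      (fun row => PySem.Str.strip ((PySem.Dict.ofList row).getD label_field ""))
  if values = [] then "unknown_control"
  else
    let lowercase_map : PySem.Dict String String :=
      values.foldl (fun d v => d.insert (PySem.Str.lower v) v) PySem.Dict.empty
    match pyControlCandidates.findSome? (fun c => lowercase_map.get? c) with
    | some v => v
    | none =>
      -- sorted(set(values))[0]; this branch is only reached with values ≠ [], so headD's default is never used
      (PySem.List.sorted (PySem.Set.ofList values) (fun x => x) false).headD ""

-- ===== PORT B =====
-- rank = {c: i for i, c in enumerate(DEFAULT_CONTROL_CANDIDATES)}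
def pvRank : PySem.Dict String Int :=
  (PySem.List.enumerate pyControlCandidates 0).foldl (fun d p => d.insert p.2 p.1) PySem.Dict.empty

-- loop body for one non-empty value v on state (best_rank, best, smallest)
def pvStepV (st : Int × Option String × Option String) (v : String) :
    Int × Option String × Option String :=
  let s := match st.2.2 with
    | none => some v
    | some t => if v < t then some v else some t
  match pvRank.get? (PySem.Str.lower v) with
  | some r => if r < st.1 then (r, some v, s) else (st.1, st.2.1, s)
  | none => (st.1, st.2.1, s)

-- loop body for one row: compute the stripped value, skip if empty
def pvStepRow (label_field : String) (st : Int × Option String × Option String)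
    (row : List (String × String)) : Int × Option String × Option String :=
  let v := PySem.Str.strip ((PySem.Dict.ofList row).getD label_field "")
  if v = "" then st else pvStepV st v

def infer_control_value_py_alt (rows : List (List (String × String))) (label_field : String) : String :=
  -- state: (best_rank, best, smallest)
  let st := rows.foldl (pvStepRow label_field)
    ((pyControlCandidates.length : Int), (none : Option String), (none : Option String))
  match st.2.1 with
  | some v => v
  | none =>
    match st.2.2 with
    | none => "unknown_control"
    | some s => s

-- ===== PRECONDITION & SPEC =====
def pvVals (rows : List (List (String × String))) (label_field : String) : List String :=
  rows.map (fun row => PySem.Str.strip ((PySem.Dict.ofList row).getD label_field ""))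

-- Pre_ excludes inputs where two differently-cased spellings of the same control candidate occur among the
-- label values: there A's dict-overwrite keeps the LAST spelling and B the first, both accidental choices.
def Pre_infer_control_value_py (rows : List (List (String × String))) (label_field : String) : Prop :=
  ∀ v1 ∈ pvVals rows label_field, ∀ v2 ∈ pvVals rows label_field,
    PySem.Str.lower v1 = PySem.Str.lower v2 → PySem.Str.lower v1 ∈ pyControlCandidates → v1 = v2
instance (rows : List (List (String × String))) (label_field : String) : Decidable (Pre_infer_control_value_py rows label_field) := by unfold Pre_infer_control_value_py; infer_instance

def pvWitness_infer_control_value_py : (List (List (String × String))) × String :=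
  ([[("label", "DMSO")], [("x", "y")], [("label", "sample1")]], "label")

def Spec_infer_control_value_py (rows : List (List (String × String))) (label_field : String) (out : String) : Prop := out = infer_control_value_py_alt rows label_field
instance (rows : List (List (String × String))) (label_field : String) (out : String) : Decidable (Spec_infer_control_value_py rows label_field out) := by unfold Spec_infer_control_value_py; infer_instance

-- ===== CLAIM (what is proved, stated in full; the proofs are below) =====
def Claim_equal_infer_control_value_py : Prop := ∀ (rows : List (List (String × String))) (label_field : String), Dom_infer_control_value_py rows label_field → Pre_infer_control_value_py rows label_field → Spec_infer_control_value_py rows label_field (infer_control_value_py rows label_field)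

-- ===== LEMMAS AND PROOFS =====

-- rank of a value: position of its lowercase form in the candidate list (5 = absent)
def pvRk (v : String) : Int := (pyControlCandidates.idxOf (PySem.Str.lower v) : Int)
-- best (smallest) rank over a list of values
def pvBrS (p : List String) : Int := p.foldl (fun m v => min m (pvRk v)) 5

-- pvRank lookup = idxOf in the candidate list
theorem pv_rank_get? (s : String) :
    pvRank.get? s = if pyControlCandidates.idxOf s < pyControlCandidates.length
      then some ((pyControlCandidates.idxOf s : Nat) : Int) else none := by
  by_cases h1 : s = "dmso"
  · subst h1; decide
  by_cases h2 : s = "negcon"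
  · subst h2; decide
  by_cases h3 : s = "negative_control"
  · subst h3; decide
  by_cases h4 : s = "mock"
  · subst h4; decide
  by_cases h5 : s = "control"
  · subst h5; decide
  have hidx : pyControlCandidates.idxOf s = 5 := by
    simp [pyControlCandidates, Ne.symm h1, Ne.symm h2, Ne.symm h3, Ne.symm h4, Ne.symm h5]
  rw [hidx]
  simp only [pyControlCandidates, List.length_cons, List.length_nil]
  norm_num
  simp [pvRank, pyControlCandidates, PySem.List.enumerate, PySem.Dict.get?, PySem.Dict.insert,
    PySem.Dict.empty, Ne.symm h1, Ne.symm h2, Ne.symm h3, Ne.symm h4, Ne.symm h5]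

-- generic foldl-min facts
theorem pv_foldl_min_le_init (g : String → Int) (p : List String) (a : Int) :
    p.foldl (fun m v => min m (g v)) a ≤ a := by
  induction p generalizing a with
  | nil => simp
  | cons v t ih => exact le_trans (ih _) (min_le_left _ _)

theorem pv_foldl_min_le_mem (g : String → Int) (p : List String) {v : String}
    (hv : v ∈ p) : ∀ a : Int, p.foldl (fun m x => min m (g x)) a ≤ g v := by
  induction p with
  | nil => cases hv
  | cons w t ih =>
    intro a
    rcases List.mem_cons.mp hv with h | h
    · subst h; exact le_trans (pv_foldl_min_le_init g t _) (min_le_right _ _)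
    · exact ih h _

theorem pv_foldl_min_lb (g : String → Int) (p : List String) (a b : Int)
    (ha : b ≤ a) (h : ∀ v ∈ p, b ≤ g v) :
    b ≤ p.foldl (fun m v => min m (g v)) a := by
  induction p generalizing a with
  | nil => simpa using ha
  | cons v t ih =>
    exact ih _ (le_min ha (h v List.mem_cons_self)) (fun w hw => h w (List.mem_cons_of_mem _ hw))

theorem pv_foldl_min_init (g : String → Int) (p : List String) (a b : Int) :
    p.foldl (fun m v => min m (g v)) (min a b) = min a (p.foldl (fun m v => min m (g v)) b) := by
  induction p generalizing b with
  | nil => simp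
  | cons v t ih =>
    simp only [List.foldl_cons]
    rw [min_assoc, ih]

theorem pv_foldl_min_shift (g : String → Int) (p : List String) (a : Int) :
    p.foldl (fun m v => min m (g v + 1)) (a + 1) = p.foldl (fun m v => min m (g v)) a + 1 := by
  induction p generalizing a with
  | nil => simp
  | cons v t ih =>
    simp only [List.foldl_cons]
    have : min (a + 1) (g v + 1) = min a (g v) + 1 := by omega
    rw [this, ih]

-- congruence for find? / findSome? on members
theorem pv_find?_congr_mem {q r : String → Bool} (p : List String)
    (h : ∀ v ∈ p, q v = r v) : p.find? q = p.find? r := by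
  induction p with
  | nil => rfl
  | cons v t ih =>
    simp only [List.find?_cons, h v List.mem_cons_self]
    exact match hr : r v with
    | true => rfl
    | false => ih (fun w hw => h w (List.mem_cons_of_mem _ hw))

theorem pv_findSome?_congr_mem {f g : String → Option String} (L : List String)
    (h : ∀ c ∈ L, f c = g c) : L.findSome? f = L.findSome? g := by
  induction L with
  | nil => rfl
  | cons c t ih =>
    rw [List.findSome?_cons, List.findSome?_cons, h c List.mem_cons_self]
    exact match g c with
    | some v => rfl
    | none => ih (fun w hw => h w (List.mem_cons_of_mem _ hw))

-- PRIORITY LEMMA: the first candidate owning a first-match yields the first value of minimal rank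
theorem pv_prio (L : List String) (f : String → String) (p : List String) :
    L.findSome? (fun c => p.find? (fun v => f v = c))
      = if p.foldl (fun m v => min m ((L.idxOf (f v) : Int))) (L.length : Int) < (L.length : Int)
        then p.find? (fun v => ((L.idxOf (f v) : Int)
               = p.foldl (fun m v => min m ((L.idxOf (f v) : Int))) (L.length : Int)))
        else none := by
  induction L with
  | nil =>
    have h0 := pv_foldl_min_lb (fun v => (List.idxOf (f v) [] : Int)) p ((List.length ([] : List String) : Nat) : Int) 0 (by simp) (fun v _ => Int.natCast_nonneg _)
    beta_reduce at h0
    simp only [List.findSome?_nil]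
    rw [if_neg (by simp only [List.length_nil, Nat.cast_zero] at h0 ⊢; omega)]
  | cons c cs ih =>
    rw [List.findSome?_cons]
    cases hfc : p.find? (fun v => f v = c) with
    | some w =>
      have hw : w ∈ p := List.mem_of_find?_eq_some hfc
      have hqw : f w = c := by simpa using List.find?_some hfc
      have hbr : p.foldl (fun m v => min m ((List.idxOf (f v) (c :: cs) : Int))) (((c :: cs).length : Nat) : Int) = 0 := by
        have hle := pv_foldl_min_le_mem (fun v => (List.idxOf (f v) (c :: cs) : Int)) p hw (((c :: cs).length : Nat) : Int)
        rw [hqw, List.idxOf_cons_self] at hle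
        have hge := pv_foldl_min_lb (fun v => (List.idxOf (f v) (c :: cs) : Int)) p (((c :: cs).length : Nat) : Int) 0 (Int.natCast_nonneg _) (fun v _ => Int.natCast_nonneg _)
        beta_reduce at hle hge ⊢
        push_cast at hle
        omega
      rw [hbr, if_pos (by simp only [List.length_cons]; push_cast; omega)]
      rw [pv_find?_congr_mem p (r := fun v => f v = c) ?_, hfc]
      intro v _
      by_cases h : f v = c
      · simp [h]
      · have hb : (c == f v) = false := by simpa using Ne.symm h
        have h2 : ¬ (List.idxOf (f v) (c :: cs) = 0) := by
          simp [List.idxOf_cons, hb]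
        simp [h, h2]
    | none =>
      have hno : ∀ v ∈ p, f v ≠ c := by
        intro v hv
        have := List.find?_eq_none.mp hfc v hv
        simpa using this
      have hstep : ∀ v ∈ p, (List.idxOf (f v) (c :: cs) : Int) = (List.idxOf (f v) cs : Int) + 1 := by
        intro v hv
        have hb : (c == f v) = false := by simpa using Ne.symm (hno v hv)
        simp [List.idxOf_cons, hb]
      have hbr : p.foldl (fun m v => min m ((List.idxOf (f v) (c :: cs) : Int))) (((c :: cs).length : Nat) : Int)
          = p.foldl (fun m v => min m ((List.idxOf (f v) cs : Int))) ((cs.length : Nat) : Int) + 1 := by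
        rw [PySem.List.foldl_congr_mem p _ (fun m v => min m ((List.idxOf (f v) cs : Int) + 1)) _
          (fun acc v hv => by rw [hstep v hv])]
        have : (((c :: cs).length : Nat) : Int) = ((cs.length : Nat) : Int) + 1 := by
          simp only [List.length_cons]; push_cast; ring
        rw [this, pv_foldl_min_shift]
      rw [hbr, ih]
      by_cases hlt : p.foldl (fun m v => min m ((List.idxOf (f v) cs : Int))) ((cs.length : Nat) : Int) < ((cs.length : Nat) : Int)
      · rw [if_pos hlt, if_pos (by simp only [List.length_cons]; push_cast; omega)]
        apply pv_find?_congr_mem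
        intro v hv
        have h1 := hstep v hv
        simp only [decide_eq_decide]
        omega
      · rw [if_neg hlt, if_neg (by simp only [List.length_cons]; push_cast; omega)]

theorem pv_brS_cons (v : String) (t : List String) : pvBrS (v :: t) = min (pvRk v) (pvBrS t) := by
  unfold pvBrS
  simp only [List.foldl_cons]
  rw [min_comm 5 (pvRk v), pv_foldl_min_init]

-- B's fold over values computes (best rank, first value attaining it, running min)
theorem pv_bfold (p : List String) (br : Int) (b sm : Option String) (hbr : br ≤ 5) :
    p.foldl pvStepV (br, b, sm)
      = (min br (pvBrS p),
         (if pvBrS p < br then p.find? (fun v => pvRk v = pvBrS p) else b),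
         p.foldl (fun s v => match s with
           | none => some v
           | some t => if v < t then some v else some t) sm) := by
  induction p generalizing br b sm with
  | nil =>
    have h5 : ¬ pvBrS ([] : List String) < br := by
      have : pvBrS ([] : List String) = 5 := rfl
      omega
    simp [pvBrS, min_def]
    omega
  | cons v t ih =>
    simp only [List.foldl_cons]
    have hstep : pvStepV (br, b, sm) v
        = (if pvRk v < br then ((pvRk v), some v,
             (match sm with | none => some v | some s => if v < s then some v else some s))
           else (br, b, (match sm with | none => some v | some s => if v < s then some v else some s))) := by
      unfold pvStepV
      rw [pv_rank_get? (PySem.Str.lower v)]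
      by_cases hn : pyControlCandidates.idxOf (PySem.Str.lower v) < pyControlCandidates.length
      · simp only [if_pos hn]
        rfl
      · simp only [if_neg hn]
        have hlen : pyControlCandidates.length = 5 := rfl
        have : ¬ pvRk v < br := by unfold pvRk; omega
        rw [if_neg this]
    rw [hstep]
    rw [pv_brS_cons]
    by_cases h : pvRk v < br
    · rw [if_pos h, ih _ _ _ (le_of_lt (lt_of_lt_of_le h hbr))]
      have h1 : min br (min (pvRk v) (pvBrS t)) = min (pvRk v) (pvBrS t) := by omega
      have h2 : min (pvRk v) (pvBrS t) < br := by omega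
      rw [h1, if_pos h2]
      by_cases hlt : pvBrS t < pvRk v
      · have hm : min (pvRk v) (pvBrS t) = pvBrS t := by omega
        rw [hm, if_pos hlt]
        rw [List.find?_cons, show (decide (pvRk v = pvBrS t)) = false from by simp; omega]
      · have hm : min (pvRk v) (pvBrS t) = pvRk v := by omega
        rw [hm, if_neg hlt]
        rw [List.find?_cons, show (decide (pvRk v = pvRk v)) = true from by simp]
    · rw [if_neg h, ih _ _ _ hbr]
      have h1 : min br (min (pvRk v) (pvBrS t)) = min br (pvBrS t) := by omega
      rw [h1]
      by_cases hlt : pvBrS t < br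
      · have hm : min (pvRk v) (pvBrS t) = pvBrS t := by omega
        rw [hm, if_pos hlt, if_pos hlt]
        rw [List.find?_cons, show (decide (pvRk v = pvBrS t)) = false from by simp; omega]
      · have hm : ¬ min (pvRk v) (pvBrS t) < br := by omega
        rw [if_neg hm, if_neg hlt]

-- fold over rows with skip-empty = fold over A's values list
theorem pv_foldl_skip {σ : Type} (f : List (String × String) → String)
    (step : σ → String → σ) (rows : List (List (String × String))) (init : σ) :
    rows.foldl (fun st row => if f row = "" then st else step st (f row)) init
      = ((rows.filter (fun row => f row ≠ "")).map f).foldl step init := by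
  induction rows generalizing init with
  | nil => rfl
  | cons r t ih =>
    by_cases h : f r = "" <;> simp [h, ih]

-- lookup in the insert-loop dictionary = last-match scan
theorem pv_get?_foldl_insert (values : List String) (c : String) (d : PySem.Dict String String) :
    (values.foldl (fun d v => d.insert (PySem.Str.lower v) v) d).get? c
      = values.foldl (fun m v => if PySem.Str.lower v = c then some v else m) (d.get? c) := by
  induction values generalizing d with
  | nil => rfl
  | cons v t ih =>
    simp only [List.foldl]
    rw [ih]
    by_cases h : PySem.Str.lower v = c
    · subst h
      rw [PySem.Dict.get?_insert_self, if_pos rfl]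
    · rw [PySem.Dict.get?_insert_of_ne d v (fun hc => h hc.symm), if_neg h]

theorem pv_lastMatch_eq_reverse_find? (f : String → String) (c : String) (p : List String)
    (init : Option String) :
    p.foldl (fun m v => if f v = c then some v else m) init
      = match p.reverse.find? (fun v => f v = c) with
        | some w => some w
        | none => init := by
  induction p generalizing init with
  | nil => rfl
  | cons v t ih =>
    simp only [List.foldl_cons, List.reverse_cons, List.find?_append]
    rw [ih]
    cases t.reverse.find? (fun v => f v = c) with
    | some w => rfl
    | none =>
      simp only [Option.none_or, List.find?_cons, List.find?_nil]
      by_cases h : f v = c <;> simp [h]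

theorem pv_reverse_find?_eq_find? (q : String → Bool) (p : List String)
    (H : ∀ v1 ∈ p, ∀ v2 ∈ p, q v1 = true → q v2 = true → v1 = v2) :
    p.reverse.find? q = p.find? q := by
  cases h1 : p.find? q with
  | none =>
    rw [List.find?_eq_none] at h1 ⊢
    intro x hx
    exact h1 x (List.mem_reverse.mp hx)
  | some w =>
    have hw : w ∈ p := List.mem_of_find?_eq_some h1
    have hqw : q w = true := List.find?_some h1
    cases h2 : p.reverse.find? q with
    | none =>
      rw [List.find?_eq_none] at h2
      exact absurd hqw (h2 w (List.mem_reverse.mpr hw))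
    | some w' =>
      have hw' : w' ∈ p := List.mem_reverse.mp (List.mem_of_find?_eq_some h2)
      have hqw' : q w' = true := List.find?_some h2
      rw [H w' hw' w hw hqw' hqw]

-- running-min fold over Option = min of the list
theorem pv_smFold_some (p : List String) (s : String) :
    p.foldl (fun sm v => match sm with
      | none => some v
      | some t => if v < t then some v else some t) (some s)
      = some (p.foldl min s) := by
  induction p generalizing s with
  | nil => rfl
  | cons v t ih =>
    simp only [List.foldl_cons]
    have : (if v < s then some v else some s) = some (min s v) := by
      by_cases h : v < s
      · simp [h, min_eq_right (le_of_lt h)]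
      · simp [h, min_eq_left (le_of_not_gt h)]
    rw [this, ih]

-- head of sorted(set(values)) is any minimum of values
theorem pv_sorted_set_head_eq (values : List String) (m : String)
    (hm : m ∈ values) (hmin : ∀ y ∈ values, m ≤ y) :
    (PySem.List.sorted (PySem.Set.ofList values) (fun x => x) false).headD "" = m := by
  have hset : PySem.Set.ofList values ≠ [] := by
    intro hnil
    have : m ∈ PySem.Set.ofList values := (PySem.Set.mem_ofList values m).mpr hm
    simp [hnil] at this
  cases hs : PySem.List.sorted (PySem.Set.ofList values) (fun x => x) false with
  | nil => exact absurd ((PySem.List.sorted_eq_nil_iff (PySem.Set.ofList values) (fun x => x) false).mp hs) hset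
  | cons hd tl =>
    have hhdmem : hd ∈ values := by
      have : hd ∈ PySem.List.sorted (PySem.Set.ofList values) (fun x => x) false := by
        rw [hs]; exact List.mem_cons_self
      exact (PySem.Set.mem_ofList values hd).mp ((PySem.List.mem_sorted (PySem.Set.ofList values) (fun x => x) false hd).mp this)
    have hle : hd ≤ m := PySem.List.key_head_sorted_le (PySem.Set.ofList values) (fun x => x) hs m ((PySem.Set.mem_ofList values m).mpr hm)
    simp [le_antisymm hle (hmin hd hhdmem)]

-- pv_prio specialised to the candidate list and pvRk/pvBrS
theorem pv_prio' (values : List String) :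
    pyControlCandidates.findSome? (fun c => values.find? (fun v => PySem.Str.lower v = c))
      = if pvBrS values < 5 then values.find? (fun v => pvRk v = pvBrS values) else none := by
  have h := pv_prio pyControlCandidates PySem.Str.lower values
  have hlen : ((pyControlCandidates.length : Nat) : Int) = 5 := rfl
  rw [hlen] at h
  exact h

-- ===== VERDICT (by name: the statement is the Claim_ definition above) =====
theorem infer_control_value_py_spec : Claim_equal_infer_control_value_py := by
  intro rows label_field _ hpre
  unfold Spec_infer_control_value_py infer_control_value_py infer_control_value_py_alt
  simp only []
  rw [show (pvStepRow label_field)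
        = (fun st row => if PySem.Str.strip ((PySem.Dict.ofList row).getD label_field "") = ""
            then st else pvStepV st (PySem.Str.strip ((PySem.Dict.ofList row).getD label_field "")))
      from rfl]
  rw [pv_foldl_skip (fun row => PySem.Str.strip ((PySem.Dict.ofList row).getD label_field "")) pvStepV rows]
  set values := ((rows.filter (fun row =>
      PySem.Str.strip ((PySem.Dict.ofList row).getD label_field "") ≠ "")).map
      (fun row => PySem.Str.strip ((PySem.Dict.ofList row).getD label_field ""))) with hv
  clear_value values
  rw [show ((pyControlCandidates.length : Nat) : Int) = 5 from rfl]
  rw [pv_bfold values 5 none none (le_refl 5)]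
  have hsub : ∀ x ∈ values, x ∈ pvVals rows label_field := by
    intro x hx
    rw [hv] at hx
    obtain ⟨row, hrow, rfl⟩ := List.mem_map.mp hx
    exact List.mem_map.mpr ⟨row, List.mem_of_mem_filter hrow, rfl⟩
  by_cases hnil : values = []
  · simp [hnil, pvBrS]
  · rw [if_neg hnil]
    have hmap : ∀ c ∈ pyControlCandidates,
        (values.foldl (fun d v => d.insert (PySem.Str.lower v) v) PySem.Dict.empty).get? c
          = values.find? (fun v => PySem.Str.lower v = c) := by
      intro c hc
      rw [pv_get?_foldl_insert values c PySem.Dict.empty]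
      have he : (PySem.Dict.empty : PySem.Dict String String).get? c = none := rfl
      rw [he, pv_lastMatch_eq_reverse_find? PySem.Str.lower c values none]
      rw [pv_reverse_find?_eq_find? _ values ?_]
      · cases values.find? (fun v => PySem.Str.lower v = c) <;> rfl
      · intro v1 h1 v2 h2 q1 q2
        have hq1 : PySem.Str.lower v1 = c := by simpa using q1
        have hq2 : PySem.Str.lower v2 = c := by simpa using q2
        exact hpre v1 (hsub v1 h1) v2 (hsub v2 h2) (hq1.trans hq2.symm) (by rw [hq1]; exact hc)
    rw [pv_findSome?_congr_mem pyControlCandidates hmap, pv_prio']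
    cases hbb : (if pvBrS values < 5 then values.find? (fun v => pvRk v = pvBrS values) else none) with
    | some v => rfl
    | none =>
      obtain ⟨w, t, rfl⟩ : ∃ w t, values = w :: t := by
        cases values with
        | nil => exact absurd rfl hnil
        | cons w t => exact ⟨w, t, rfl⟩
      simp only [List.foldl_cons]
      rw [pv_smFold_some]
      have hminq : PySem.List.min? (w :: t) (fun y => y) = some (t.foldl min w) :=
        PySem.List.min?_id_cons w t
      exact pv_sorted_set_head_eq (w :: t) (t.foldl min w)
        (PySem.List.min?_mem hminq)
        (fun y hy => PySem.List.min?_isMin hminq y hy)
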